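-- pv_equiv track=rewrite | github.com/tihanaujevic/algorithms_in_Bioinformatics | chapter5/BA5E.py | moves_to_strings
-- ===== SOURCE A (Python) =====
-- def moves_to_strings(first_word, second_word, moves):
--     pointer_w1 = 0
--     pointer_w2 = 0
--
--     w1 = []
--     w2 = []
--
--     for move in moves:
--         if move == "D":
--             w1.append(first_word[pointer_w1])
--             pointer_w1 += 1
--             w2.append("-")
--         if move == "I":
--             w1.append("-")
--             w2.append(second_word[pointer_w2])
--             pointer_w2 += 1
--         if move == "M":
--             w1.append(first_word[pointer_w1])
--             pointer_w1 += 1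
--             w2.append(second_word[pointer_w2])
--             pointer_w2 += 1
--
--     return "".join(w1), "".join(w2)
-- ===== SOURCE B (Python) =====
-- def moves_to_strings(first_word, second_word, moves):
--     i = 0
--     w1 = []
--     for m in moves:
--         if m == "D" or m == "M":
--             w1.append(first_word[i])
--             i += 1
--         elif m == "I":
--             w1.append("-")
--     j = 0
--     w2 = []
--     for m in moves:
--         if m == "I" or m == "M":
--             w2.append(second_word[j])
--             j += 1
--         elif m == "D":
--             w2.append("-")
--     return "".join(w1), "".join(w2)
-- ===== Notes on version B (the rewrite author's own statement) =====
-- stated objective: alternative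
-- what changed: B builds each aligned string in its own independent pass over the moves (one pointer and one output list per pass) instead of A's single intertwined loop maintaining two pointers and two lists at once.
import Mathlib
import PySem

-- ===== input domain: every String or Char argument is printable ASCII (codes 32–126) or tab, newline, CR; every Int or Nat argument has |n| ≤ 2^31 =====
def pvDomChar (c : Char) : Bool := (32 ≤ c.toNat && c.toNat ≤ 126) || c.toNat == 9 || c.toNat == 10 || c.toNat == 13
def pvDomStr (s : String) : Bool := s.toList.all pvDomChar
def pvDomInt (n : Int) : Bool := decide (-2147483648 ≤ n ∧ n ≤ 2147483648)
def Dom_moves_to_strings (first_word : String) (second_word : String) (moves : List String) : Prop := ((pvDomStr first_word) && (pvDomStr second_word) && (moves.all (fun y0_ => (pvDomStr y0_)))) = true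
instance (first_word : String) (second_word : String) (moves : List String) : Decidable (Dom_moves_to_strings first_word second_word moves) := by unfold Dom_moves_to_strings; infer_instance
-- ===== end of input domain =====

-- B builds the two aligned strings in two separate passes over the moves instead of A's one intertwined loop (alternative decomposition; same cost).

-- ===== PORT A =====
-- first_word[p] (Python indexing; Pre_ guarantees the index is in range, the '?' default is never reached inside Pre_)
def pvAt (w : List Char) (i : Int) : Char := (PySem.List.pyGet? w i).getD '?'

-- A's loop body: the three sequential (non-elif) ifs, on state (pointer_w1, pointer_w2, w1, w2)
def stepA (fw sw : List Char) (st : Int × Int × List Char × List Char) (move : String) : Int × Int × List Char × List Char :=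
  let st := if move = "D" then (st.1 + 1, st.2.1, st.2.2.1 ++ [pvAt fw st.1], st.2.2.2 ++ ['-']) else st
  let st := if move = "I" then (st.1, st.2.1 + 1, st.2.2.1 ++ ['-'], st.2.2.2 ++ [pvAt sw st.2.1]) else st
  if move = "M" then (st.1 + 1, st.2.1 + 1, st.2.2.1 ++ [pvAt fw st.1], st.2.2.2 ++ [pvAt sw st.2.1]) else st

def moves_to_strings (first_word : String) (second_word : String) (moves : List String) : String × String :=
  let r := moves.foldl (stepA first_word.toList second_word.toList) (0, 0, [], [])
  (String.mk r.2.2.1, String.mk r.2.2.2)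

-- ===== PORT B =====
-- first pass: first aligned word, pointer i into first_word
def stepB1 (fw : List Char) (st : Int × List Char) (m : String) : Int × List Char :=
  if m = "D" ∨ m = "M" then (st.1 + 1, st.2 ++ [pvAt fw st.1])
  else if m = "I" then (st.1, st.2 ++ ['-']) else st

-- second pass: second aligned word, pointer j into second_word
def stepB2 (sw : List Char) (st : Int × List Char) (m : String) : Int × List Char :=
  if m = "I" ∨ m = "M" then (st.1 + 1, st.2 ++ [pvAt sw st.1])
  else if m = "D" then (st.1, st.2 ++ ['-']) else st

def moves_to_strings_alt (first_word : String) (second_word : String) (moves : List String) : String × String :=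
  let r1 := moves.foldl (stepB1 first_word.toList) (0, [])
  let r2 := moves.foldl (stepB2 second_word.toList) (0, [])
  (String.mk r1.2, String.mk r2.2)

-- ===== PRECONDITION & SPEC =====
-- Pre_ excludes exactly the inputs on which A raises IndexError: more D/M moves than first_word has
-- characters, or more I/M moves than second_word has (B raises there too).
def Pre_moves_to_strings (first_word : String) (second_word : String) (moves : List String) : Prop :=
  (moves.count "D" + moves.count "M" ≤ first_word.toList.length) ∧
  (moves.count "I" + moves.count "M" ≤ second_word.toList.length)
instance (first_word : String) (second_word : String) (moves : List String) : Decidable (Pre_moves_to_strings first_word second_word moves) := by unfold Pre_moves_to_strings; infer_instance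

def pvWitness_moves_to_strings : String × String × List String := ("ab", "cd", ["M", "D", "I", "X"])

def Spec_moves_to_strings (first_word : String) (second_word : String) (moves : List String) (out : String × String) : Prop := out = moves_to_strings_alt first_word second_word moves
instance (first_word : String) (second_word : String) (moves : List String) (out : String × String) : Decidable (Spec_moves_to_strings first_word second_word moves out) := by unfold Spec_moves_to_strings; infer_instance

-- ===== CLAIM (what is proved, stated in full; the proofs are below) =====
def Claim_equal_moves_to_strings : Prop := ∀ (first_word : String) (second_word : String) (moves : List String), Dom_moves_to_strings first_word second_word moves → Pre_moves_to_strings first_word second_word moves → Spec_moves_to_strings first_word second_word moves (moves_to_strings first_word second_word moves)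

-- ===== LEMMAS AND PROOFS =====

-- A's intertwined fold is the pairing of B's two independent folds (for any start state).
theorem foldA_eq_foldB (fw sw : List Char) (moves : List String) :
    ∀ (p1 p2 : Int) (w1 w2 : List Char),
      moves.foldl (stepA fw sw) (p1, p2, w1, w2) =
        ((moves.foldl (stepB1 fw) (p1, w1)).1, (moves.foldl (stepB2 sw) (p2, w2)).1,
         (moves.foldl (stepB1 fw) (p1, w1)).2, (moves.foldl (stepB2 sw) (p2, w2)).2) := by
  induction moves with
  | nil => intro p1 p2 w1 w2; rfl
  | cons m ms ih =>
    intro p1 p2 w1 w2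
    simp only [List.foldl_cons]
    by_cases hD : m = "D"
    · subst hD
      simp [stepA, stepB1, stepB2, ih]
    · by_cases hI : m = "I"
      · subst hI
        simp [stepA, stepB1, stepB2, ih]
      · by_cases hM : m = "M"
        · subst hM
          simp [stepA, stepB1, stepB2, ih]
        · simp [stepA, stepB1, stepB2, hD, hI, hM, ih]

-- ===== VERDICT (by name: the statement is the Claim_ definition above) =====
theorem moves_to_strings_spec : Claim_equal_moves_to_strings := by
  intro fw sw moves _ _
  unfold Spec_moves_to_strings moves_to_strings moves_to_strings_alt
  rw [foldA_eq_foldB]
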